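-- pv_equiv track=rewrite | github.com/Nicholaskapaz/EP2-Nicholas-e-Caue | funçoes ep2.py | transforma_base
-- ===== SOURCE A (Python) =====
-- def transforma_base(base_de_questoes):
--     dicionario = {}
--     for lista in base_de_questoes:
--         n = lista['nivel'] #n recebe a lista com o value da key 'nível' (no caso, "facil")
--         if n not in dicionario:
--             dicionario[n] = []  #assim eu adiciono uma key (no caso "facil", que eu quero que seja apresentada na saída como uma key) no dicionário
--         dicionario[n].append(lista) #com o append eu adiciono um dicionário na lista. Na key fácil, eu quero adicionar um dicionário
--     return dicionario
-- ===== SOURCE B (Python) =====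
-- def transforma_base(base_de_questoes):
--     # collect the distinct levels in first-occurrence order, then build each
--     # bucket by filtering the whole list (dict comprehension), instead of
--     # dispatching each item into a mutable bucket dict in one pass.
--     niveis = []
--     for q in base_de_questoes:
--         n = q['nivel']
--         if n not in niveis:
--             niveis.append(n)
--     return {n: [q for q in base_de_questoes if q['nivel'] == n] for n in niveis}
-- ===== Notes on version B (the rewrite author's own statement) =====
-- stated objective: alternative
-- what changed: Instead of a single pass that dispatches each question into a mutable bucket dict, B first collects the distinct 'nivel' values in first-occurrence order and then builds the result as a dict comprehension whose bucket for each level is a filter of the whole input list.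
import Mathlib
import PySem

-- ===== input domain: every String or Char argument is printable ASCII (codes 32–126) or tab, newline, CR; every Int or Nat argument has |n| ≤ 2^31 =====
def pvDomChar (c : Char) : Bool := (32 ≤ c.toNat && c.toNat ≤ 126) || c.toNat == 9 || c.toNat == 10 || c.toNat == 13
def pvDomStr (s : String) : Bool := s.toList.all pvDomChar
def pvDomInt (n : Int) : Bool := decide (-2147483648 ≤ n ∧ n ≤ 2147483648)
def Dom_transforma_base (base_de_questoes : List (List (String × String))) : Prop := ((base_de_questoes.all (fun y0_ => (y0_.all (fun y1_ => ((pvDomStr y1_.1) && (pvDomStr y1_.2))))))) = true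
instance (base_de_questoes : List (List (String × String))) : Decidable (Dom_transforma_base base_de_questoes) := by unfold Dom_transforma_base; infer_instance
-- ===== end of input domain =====

-- B replaces A's single dispatch-into-buckets pass by "dedup the levels, then one filter
-- of the whole list per level" (a dict comprehension); same return value, not faster.


-- ===== PORT A =====
-- for q in base: n = q['nivel']; if n not in d: d[n] = []; d[n].append(q)   (the `none`
-- branch is Python's KeyError, excluded by Pre_)
def transforma_base (base_de_questoes : List (List (String × String))) : List (String × List (List (String × String))) :=
  (base_de_questoes.foldl (fun dicionario lista =>
      match (PySem.Dict.mk lista).get? "nivel" with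
      | none => dicionario
      | some n =>
        let d := if dicionario.contains n then dicionario else dicionario.insert n []
        d.modify n [] (fun l => l ++ [lista]))
    PySem.Dict.empty).items

-- ===== PORT B =====
-- ordered dedup of the levels, then one filter of the whole list per level (the `none`
-- branch is Python's KeyError, excluded by Pre_)
def transforma_base_alt (base_de_questoes : List (List (String × String))) : List (String × List (List (String × String))) :=
  let niveis := base_de_questoes.foldl (fun acc q =>
      match (PySem.Dict.mk q).get? "nivel" with
      | none => acc
      | some n => if acc.contains n then acc else acc ++ [n]) ([] : List String)
  niveis.map (fun n => (n, base_de_questoes.filter (fun q => (PySem.Dict.mk q).get? "nivel" == some n)))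

-- ===== PRECONDITION & SPEC =====
-- Pre_ excludes exactly the inputs where some question lacks the key 'nivel', on which A raises KeyError.
def Pre_transforma_base (base_de_questoes : List (List (String × String))) : Prop :=
  (base_de_questoes.all (fun q => (PySem.Dict.mk q).contains "nivel")) = true
instance (base_de_questoes : List (List (String × String))) : Decidable (Pre_transforma_base base_de_questoes) := by unfold Pre_transforma_base; infer_instance
def pvWitness_transforma_base : (List (List (String × String))) := [[("nivel", "facil"), ("enunciado", "2+2?")], [("nivel", "dificil")]]
def Spec_transforma_base (base_de_questoes : List (List (String × String))) (out : List (String × List (List (String × String)))) : Prop := out = transforma_base_alt base_de_questoes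
instance (base_de_questoes : List (List (String × String))) (out : List (String × List (List (String × String)))) : Decidable (Spec_transforma_base base_de_questoes out) := by unfold Spec_transforma_base; infer_instance

-- ===== CLAIM (what is proved, stated in full; the proofs are below) =====
def Claim_equal_transforma_base : Prop := ∀ (base_de_questoes : List (List (String × String))), Dom_transforma_base base_de_questoes → Pre_transforma_base base_de_questoes → Spec_transforma_base base_de_questoes (transforma_base base_de_questoes)

-- ===== LEMMAS AND PROOFS =====

-- the level of a question (used only by the proofs, as the common canonical form)
def pvNivel (q : List (String × String)) : String := ((PySem.Dict.mk q).get? "nivel").getD ""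

-- the canonical value both ports reduce to
def pvCanon (base : List (List (String × String))) : List (String × List (List (String × String))) :=
  (PySem.Set.ofList (base.map pvNivel)).map (fun k => (k, base.filter (fun q => pvNivel q == k)))

theorem pvGet_eq_some {q : List (String × String)} (h : (PySem.Dict.mk q).contains "nivel" = true) :
    (PySem.Dict.mk q).get? "nivel" = some (pvNivel q) := by
  rw [PySem.Dict.contains_eq_isSome_get?] at h
  obtain ⟨v, hv⟩ := Option.isSome_iff_exists.mp h
  simp [pvNivel, hv]

theorem pvStepA_eq {d : PySem.Dict String (List (List (String × String)))} {n : String}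
    (f : List (List (String × String)) → List (List (String × String))) :
    (if d.contains n then d else d.insert n []).modify n [] f = d.modify n [] f := by
  by_cases h : d.contains n = true
  · simp [h]
  · rw [Bool.not_eq_true] at h
    simp only [h, Bool.false_eq_true, if_false, PySem.Dict.modify,
      PySem.Dict.getD_insert_self, PySem.Dict.insert_insert_self,
      PySem.Dict.getD_of_not_contains d [] h]

theorem pvA_eq (base : List (List (String × String))) (h : Pre_transforma_base base) :
    transforma_base base = pvCanon base := by
  unfold Pre_transforma_base at h
  rw [List.all_eq_true] at h
  unfold transforma_base
  rw [PySem.List.foldl_congr_mem _ _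
      (fun d q => d.modify (pvNivel q) [] (fun l => l ++ [q])) _
      (fun d q hq => by rw [pvGet_eq_some (by simpa using h q hq)]; exact pvStepA_eq _)]
  have hnodup : ((base.foldl (fun d q => d.modify (pvNivel q) [] (fun l => l ++ [q]))
      PySem.Dict.empty)).keys.Nodup :=
    PySem.Dict.nodup_keys_foldl_modify_key base pvNivel [] _ _ (by simp)
  rw [PySem.Dict.items_eq_map_keys _ hnodup []]
  rw [PySem.Dict.keys_foldl_modify_key]
  have hfold : base.foldl (fun d q => d.modify (pvNivel q) [] (fun l => l ++ [q]))
      PySem.Dict.empty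
      = (base.map (fun q => (pvNivel q, q))).foldl
          (fun d p => d.modify p.1 [] (fun l => l ++ [p.2])) PySem.Dict.empty := by
    rw [List.foldl_map]
  unfold pvCanon
  have hkeys : PySem.Set.update (PySem.Dict.empty : PySem.Dict String (List (List (String × String)))).keys (base.map pvNivel)
      = PySem.Set.ofList (base.map pvNivel) := by
    simp [PySem.Dict.keys_empty, PySem.Set.update_nil_left]
  rw [hkeys]
  apply List.map_congr_left
  intro k _
  rw [hfold, PySem.Dict.getD_foldl_modify_append]
  simp [List.filter_map, List.map_map, Function.comp_def]

theorem pvB_eq (base : List (List (String × String))) (h : Pre_transforma_base base) :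
    transforma_base_alt base = pvCanon base := by
  unfold Pre_transforma_base at h
  rw [List.all_eq_true] at h
  unfold transforma_base_alt
  rw [PySem.List.foldl_congr_mem _ _ (fun acc q => PySem.Set.add acc (pvNivel q)) _
      (fun acc q hq => by
        rw [pvGet_eq_some (by simpa using h q hq)]
        rfl)]
  rw [← PySem.Set.update_map_eq_foldl_add, PySem.Set.update_nil_left]
  unfold pvCanon
  apply List.map_congr_left
  intro k _
  congr 1
  apply List.filter_congr
  intro q hq
  rw [pvGet_eq_some (by simpa using h q hq)]
  simp

-- ===== VERDICT (by name: the statement is the Claim_ definition above) =====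
theorem transforma_base_spec : Claim_equal_transforma_base := by
  intro base _ hpre
  unfold Spec_transforma_base
  rw [pvA_eq base hpre, pvB_eq base hpre]
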